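-- pv_equiv track=rewrite | github.com/cesargiraldoa/EasyProNotarial-2 | scripts/convert_easypro1_tablemaster_to_catalogs.py | build_catalogs
-- ===== SOURCE A (Python) =====
-- from collections import OrderedDict
--
-- def build_catalogs(rows: list[list[str | None]]) -> OrderedDict[str, list[str]]:
--     catalogs: OrderedDict[str, list[str]] = OrderedDict()
--     seen_values: dict[str, set[str]] = {}
--
--     for row in rows:
--         if len(row) < 6:
--             continue
--         table_name = (row[3] or "").strip()
--         value = (row[4] or "").strip()
--         status = (row[5] or "").strip()
--         if not table_name or not value or status != "1":
--             continue
--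
--         if table_name not in catalogs:
--             catalogs[table_name] = []
--             seen_values[table_name] = set()
--
--         if value in seen_values[table_name]:
--             continue
--
--         catalogs[table_name].append(value)
--         seen_values[table_name].add(value)
--
--     return catalogs
-- ===== SOURCE B (Python) =====
-- from collections import OrderedDict
--
--
-- def _entry(row):
--     if len(row) < 6:
--         return None
--     table_name = (row[3] or "").strip()
--     value = (row[4] or "").strip()
--     status = (row[5] or "").strip()
--     if table_name and value and status == "1":
--         return table_name, value
--     return None
--
--
-- def build_catalogs(rows):
--     grouped = OrderedDict()
--     for entry in map(_entry, rows):
--         if entry is not None: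
--             grouped.setdefault(entry[0], []).append(entry[1])
--     return OrderedDict((name, list(dict.fromkeys(values)))
--                        for name, values in grouped.items())
-- ===== Notes on version B (the rewrite author's own statement) =====
-- stated objective: alternative
-- what changed: Replaced the single pass with inline per-table seen-sets by a factored row filter plus a grouping pass that keeps duplicates, followed by a separate dedup phase (list(dict.fromkeys(...))) over the grouped dict.
import Mathlib
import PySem

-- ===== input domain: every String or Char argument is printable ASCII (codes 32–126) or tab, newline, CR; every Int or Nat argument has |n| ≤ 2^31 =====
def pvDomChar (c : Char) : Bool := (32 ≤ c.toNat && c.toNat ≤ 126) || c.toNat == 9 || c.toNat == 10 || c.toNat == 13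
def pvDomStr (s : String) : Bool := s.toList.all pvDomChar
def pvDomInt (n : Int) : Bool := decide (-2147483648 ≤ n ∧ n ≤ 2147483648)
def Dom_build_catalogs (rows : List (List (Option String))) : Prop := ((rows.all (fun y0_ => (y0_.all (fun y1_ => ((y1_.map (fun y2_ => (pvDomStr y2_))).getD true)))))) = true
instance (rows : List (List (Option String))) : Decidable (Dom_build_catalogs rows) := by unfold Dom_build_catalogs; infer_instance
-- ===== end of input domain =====

-- B replaces A's inline per-table seen-sets by grouping all qualifying values first
-- (duplicates kept) and deduplicating each list in a separate second phase; objective: alternative decomposition (same cost).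

-- ===== PORT A =====
def build_catalogs (rows : List (List (Option String))) : List (String × List String) :=
  (rows.foldl
    (fun st row =>
      if row.length < 6 then st else
      let table_name := PySem.Str.strip (((PySem.List.pyGet? row 3).getD none).getD "")
      let value := PySem.Str.strip (((PySem.List.pyGet? row 4).getD none).getD "")
      let status := PySem.Str.strip (((PySem.List.pyGet? row 5).getD none).getD "")
      if table_name = "" ∨ value = "" ∨ status ≠ "1" then st else
      let st1 := if ¬ st.1.contains table_name then
                   (st.1.insert table_name [], st.2.insert table_name PySem.Set.empty)
                 else st
      if PySem.Set.contains (st1.2.getD table_name PySem.Set.empty) value then st1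
      else (st1.1.modify table_name [] (· ++ [value]),
            st1.2.modify table_name PySem.Set.empty (fun s => PySem.Set.add s value)))
    ((PySem.Dict.empty : PySem.Dict String (List String)),
     (PySem.Dict.empty : PySem.Dict String (PySem.Set String)))).1.items

-- ===== PORT B =====
-- helper _entry of Source B
def pvEntry (row : List (Option String)) : Option (String × String) :=
  if row.length < 6 then none else
  let table_name := PySem.Str.strip (((PySem.List.pyGet? row 3).getD none).getD "")
  let value := PySem.Str.strip (((PySem.List.pyGet? row 4).getD none).getD "")
  let status := PySem.Str.strip (((PySem.List.pyGet? row 5).getD none).getD "")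
  if table_name ≠ "" ∧ value ≠ "" ∧ status = "1" then some (table_name, value) else none

def build_catalogs_alt (rows : List (List (Option String))) : List (String × List String) :=
  (((rows.map pvEntry).foldl
      (fun grouped entry =>
        match entry with
        | some e => grouped.modify e.1 [] (· ++ [e.2])
        | none => grouped)
      (PySem.Dict.empty : PySem.Dict String (List String))).items).map
    (fun p => (p.1, PySem.List.dedup p.2))

-- ===== PRECONDITION & SPEC =====
def Spec_build_catalogs (rows : List (List (Option String))) (out : List (String × List String)) : Prop := out = build_catalogs_alt rows
instance (rows : List (List (Option String))) (out : List (String × List String)) : Decidable (Spec_build_catalogs rows out) := by unfold Spec_build_catalogs; infer_instance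

-- ===== CLAIM (what is proved, stated in full; the proofs are below) =====
def Claim_equal_build_catalogs : Prop := ∀ (rows : List (List (Option String))), Dom_build_catalogs rows → Spec_build_catalogs rows (build_catalogs rows)

-- ===== LEMMAS AND PROOFS =====

-- A's loop body, named for the proofs (definitionally the lambda in the port)
def stepA (st : PySem.Dict String (List String) × PySem.Dict String (PySem.Set String))
    (row : List (Option String)) :
    PySem.Dict String (List String) × PySem.Dict String (PySem.Set String) :=
  if row.length < 6 then st else
  let table_name := PySem.Str.strip (((PySem.List.pyGet? row 3).getD none).getD "")
  let value := PySem.Str.strip (((PySem.List.pyGet? row 4).getD none).getD "")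
  let status := PySem.Str.strip (((PySem.List.pyGet? row 5).getD none).getD "")
  if table_name = "" ∨ value = "" ∨ status ≠ "1" then st else
  let st1 := if ¬ st.1.contains table_name then
               (st.1.insert table_name [], st.2.insert table_name PySem.Set.empty)
             else st
  if PySem.Set.contains (st1.2.getD table_name PySem.Set.empty) value then st1
  else (st1.1.modify table_name [] (· ++ [value]),
        st1.2.modify table_name PySem.Set.empty (fun s => PySem.Set.add s value))

-- A's loop body after the filters, acting on an admitted (table, value) pair
def stepA' (st : PySem.Dict String (List String) × PySem.Dict String (PySem.Set String))
    (t v : String) :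
    PySem.Dict String (List String) × PySem.Dict String (PySem.Set String) :=
  let st1 := if ¬ st.1.contains t then (st.1.insert t [], st.2.insert t PySem.Set.empty) else st
  if PySem.Set.contains (st1.2.getD t PySem.Set.empty) v then st1
  else (st1.1.modify t [] (· ++ [v]),
        st1.2.modify t PySem.Set.empty (fun s => PySem.Set.add s v))

-- B's loop body, named for the proofs
def stepB (grouped : PySem.Dict String (List String)) (entry : Option (String × String)) :
    PySem.Dict String (List String) :=
  match entry with
  | some e => grouped.modify e.1 [] (· ++ [e.2])
  | none => grouped

set_option maxHeartbeats 1000000 in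
lemma stepA_eq_entry (st : PySem.Dict String (List String) × PySem.Dict String (PySem.Set String))
    (row : List (Option String)) :
    stepA st row = match pvEntry row with
      | none => st
      | some (t, v) => stepA' st t v := by
  simp only [stepA, pvEntry]
  by_cases h1 : row.length < 6
  · simp only [if_pos h1]
  · simp only [if_neg h1]
    by_cases h2 : PySem.Str.strip (((PySem.List.pyGet? row 3).getD none).getD "") = "" ∨
        PySem.Str.strip (((PySem.List.pyGet? row 4).getD none).getD "") = "" ∨
        PySem.Str.strip (((PySem.List.pyGet? row 5).getD none).getD "") ≠ "1"
    · rw [if_pos h2, if_neg (by tauto)]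
    · have h3 := h2; push Not at h3
      rw [if_neg h2, if_pos h3]
      rfl

lemma dedup_append_singleton (l : List String) (v : String) :
    PySem.List.dedup (l ++ [v]) =
      if v ∈ l then PySem.List.dedup l else PySem.List.dedup l ++ [v] := by
  simp only [PySem.List.dedup_eq_ofList, PySem.Set.ofList_append_singleton,
    PySem.Set.add_eq_ite, PySem.Set.mem_ofList]

lemma stepA'_pres
    (cat : PySem.Dict String (List String)) (seen : PySem.Dict String (PySem.Set String))
    (grp : PySem.Dict String (List String)) (t v : String)
    (hkeys : cat.keys = grp.keys)
    (hnodup : grp.keys.Nodup)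
    (hval : ∀ u, cat.getD u [] = PySem.List.dedup (grp.getD u []))
    (hseen : ∀ u w, w ∈ seen.getD u PySem.Set.empty ↔ w ∈ grp.getD u []) :
    (stepA' (cat, seen) t v).1.keys = (grp.modify t [] (· ++ [v])).keys ∧
    (grp.modify t [] (· ++ [v])).keys.Nodup ∧
    (∀ u, (stepA' (cat, seen) t v).1.getD u [] =
        PySem.List.dedup ((grp.modify t [] (· ++ [v])).getD u [])) ∧
    (∀ u w, w ∈ (stepA' (cat, seen) t v).2.getD u PySem.Set.empty ↔
        w ∈ (grp.modify t [] (· ++ [v])).getD u []) := by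
  have hgc : grp.contains t = cat.contains t := by
    rw [PySem.Dict.contains_eq_decide_mem_keys, PySem.Dict.contains_eq_decide_mem_keys, hkeys]
  have gg : ∀ u, (grp.modify t [] (· ++ [v])).getD u [] =
      if u = t then grp.getD t [] ++ [v] else grp.getD u [] := by
    intro u; exact PySem.Dict.getD_modify grp t u [] (· ++ [v])
  by_cases hc : cat.contains t = true
  · -- table already present
    have hgt : grp.contains t = true := by rw [hgc]; exact hc
    have gk : (grp.modify t [] (· ++ [v])).keys = grp.keys := by
      rw [PySem.Dict.keys_modify, PySem.Dict.keys_insert_of_contains _ _ hgt]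
    by_cases hv : v ∈ grp.getD t []
    · -- duplicate value: A skips
      have hm : v ∈ seen.getD t [] := (hseen t v).mpr hv
      have hstep : stepA' (cat, seen) t v = (cat, seen) := by
        simp [stepA', hc, hm]
      rw [hstep]
      refine ⟨by rw [gk]; exact hkeys, by rw [gk]; exact hnodup, ?_, ?_⟩
      · intro u
        rw [gg u]
        by_cases hu : u = t
        · subst hu; rw [if_pos rfl, dedup_append_singleton, if_pos hv]; exact hval u
        · rw [if_neg hu]; exact hval u
      · intro u w
        rw [gg u]
        by_cases hu : u = t
        · subst hu; rw [if_pos rfl]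
          simp only [List.mem_append, List.mem_singleton]
          constructor
          · intro h; exact Or.inl ((hseen u w).mp h)
          · rintro (h | rfl)
            · exact (hseen u w).mpr h
            · exact (hseen u w).mpr hv
        · rw [if_neg hu]; exact hseen u w
    · -- new value in an existing table
      have hm : v ∉ seen.getD t [] := fun h => hv ((hseen t v).mp h)
      have hstep : stepA' (cat, seen) t v =
          (cat.modify t [] (· ++ [v]), seen.modify t PySem.Set.empty (fun s => PySem.Set.add s v)) := by
        simp [stepA', hc, hm]
      rw [hstep]
      have ck : (cat.modify t [] (· ++ [v])).keys = cat.keys := by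
        rw [PySem.Dict.keys_modify, PySem.Dict.keys_insert_of_contains _ _ hc]
      refine ⟨by rw [gk, ck]; exact hkeys, by rw [gk]; exact hnodup, ?_, ?_⟩
      · intro u
        rw [gg u, PySem.Dict.getD_modify cat t u [] (· ++ [v])]
        by_cases hu : u = t
        · subst hu
          rw [if_pos rfl, if_pos rfl, dedup_append_singleton _ _, if_neg hv, hval u]
        · rw [if_neg hu, if_neg hu]; exact hval u
      · intro u w
        rw [gg u, PySem.Dict.getD_modify seen t u PySem.Set.empty (fun s => PySem.Set.add s v)]
        by_cases hu : u = t
        · subst hu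
          rw [if_pos rfl, if_pos rfl]
          rw [PySem.Set.mem_add]
          simp only [List.mem_append, List.mem_singleton]
          constructor
          · rintro (h | rfl)
            · exact Or.inl ((hseen u w).mp h)
            · exact Or.inr rfl
          · rintro (h | rfl)
            · exact Or.inl ((hseen u w).mpr h)
            · exact Or.inr rfl
        · rw [if_neg hu, if_neg hu]; exact hseen u w
  · -- new table
    have hc' : cat.contains t = false := by
      cases h : cat.contains t with
      | true => exact absurd h hc
      | false => rfl
    have hgt : grp.contains t = false := by rw [hgc]; exact hc'
    have hgnil : grp.getD t [] = [] := PySem.Dict.getD_of_not_contains grp [] hgt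
    have htm : t ∉ grp.keys := by
      have h := PySem.Dict.contains_eq_decide_mem_keys grp t
      rw [hgt] at h
      simpa using h.symm
    have gk : (grp.modify t [] (· ++ [v])).keys = grp.keys ++ [t] := by
      rw [PySem.Dict.keys_modify, PySem.Dict.keys_insert_of_not_contains _ _ hgt]
    have hstep : stepA' (cat, seen) t v =
        ((cat.insert t []).modify t [] (· ++ [v]),
         (seen.insert t PySem.Set.empty).modify t PySem.Set.empty (fun s => PySem.Set.add s v)) := by
      simp [stepA', hc', PySem.Dict.getD_insert_self]
    rw [hstep]
    have ck : ((cat.insert t []).modify t [] (· ++ [v])).keys = cat.keys ++ [t] := by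
      rw [PySem.Dict.keys_modify, PySem.Dict.keys_insert_of_contains _ _ (PySem.Dict.contains_insert_self cat t []),
        PySem.Dict.keys_insert_of_not_contains _ _ hc']
    refine ⟨by rw [gk, ck, hkeys], ?_, ?_, ?_⟩
    · rw [gk]
      simp [List.nodup_append, hnodup]
      exact fun a ha h => htm (h ▸ ha)
    · intro u
      rw [gg u, PySem.Dict.getD_modify (cat.insert t []) t u [] (· ++ [v]),
        PySem.Dict.getD_insert cat t u [] []]
      by_cases hu : u = t
      · subst hu
        rw [if_pos rfl, if_pos rfl, PySem.Dict.getD_insert_self, hgnil]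
        simp [PySem.List.dedup_eq_ofList, PySem.Set.ofList]
      · rw [if_neg hu, if_neg hu, if_neg hu]; exact hval u
    · intro u w
      rw [gg u, PySem.Dict.getD_modify (seen.insert t PySem.Set.empty) t u PySem.Set.empty
        (fun s => PySem.Set.add s v)]
      by_cases hu : u = t
      · subst hu
        rw [if_pos rfl, if_pos rfl, PySem.Dict.getD_insert_self, hgnil, PySem.Set.mem_add]
        simp [PySem.Set.empty]
      · rw [if_neg hu, if_neg hu, PySem.Dict.getD_insert seen t u PySem.Set.empty PySem.Set.empty,
          if_neg hu]
        exact hseen u w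

lemma main_invariant (rows : List (List (Option String)))
    (cat : PySem.Dict String (List String)) (seen : PySem.Dict String (PySem.Set String))
    (grp : PySem.Dict String (List String))
    (hkeys : cat.keys = grp.keys)
    (hnodup : grp.keys.Nodup)
    (hval : ∀ t, cat.getD t [] = PySem.List.dedup (grp.getD t []))
    (hseen : ∀ t v, v ∈ seen.getD t PySem.Set.empty ↔ v ∈ grp.getD t []) :
    (rows.foldl stepA (cat, seen)).1.items =
      ((rows.map pvEntry).foldl stepB grp).items.map (fun p => (p.1, PySem.List.dedup p.2)) := by
  induction rows generalizing cat seen grp with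
  | nil =>
      simp only [List.foldl_nil, List.map_nil]
      rw [PySem.Dict.items_eq_map_keys cat (hkeys ▸ hnodup) [],
          PySem.Dict.items_eq_map_keys grp hnodup [], List.map_map, hkeys]
      exact List.map_congr_left (fun k _ => by simp [hval k])
  | cons row rest ih =>
      simp only [List.foldl_cons, List.map_cons]
      rw [show stepA (cat, seen) row = _ from stepA_eq_entry (cat, seen) row]
      cases he : pvEntry row with
      | none => exact ih cat seen grp hkeys hnodup hval hseen
      | some e =>
          obtain ⟨t, v⟩ := e
          obtain ⟨k1, k2, k3, k4⟩ := stepA'_pres cat seen grp t v hkeys hnodup hval hseen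
          have := ih (stepA' (cat, seen) t v).1 (stepA' (cat, seen) t v).2
            (grp.modify t [] (· ++ [v])) k1 k2 k3 k4
          simpa [stepB] using this

-- ===== VERDICT (by name: the statement is the Claim_ definition above) =====
theorem build_catalogs_spec : Claim_equal_build_catalogs := by
  intro rows _
  unfold Spec_build_catalogs build_catalogs build_catalogs_alt
  exact main_invariant rows PySem.Dict.empty PySem.Dict.empty PySem.Dict.empty rfl
    (by simp [PySem.Dict.keys, PySem.Dict.empty])
    (fun t => rfl) (fun t v => Iff.rfl)
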